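-- pv_equiv track=rewrite | github.com/JakeSaunders1995/comp16321MarkingMid | CW_rugby/rugby_z35437sk/rugby_z35437sk.py | rugby_solver
-- ===== SOURCE A (Python) =====
-- def rugby_solver(st):
--     team1=False
--     team2=False
--     score1=0
--     score2=0
--     for ch in st:
-- 					if(ch=='1'):
-- 						team1=True
-- 						team2=False
-- 						continue
-- 					if(ch=='2'):
-- 						team2=True
-- 						team1=False
-- 						continue
--
-- 					if(team1==True):
-- 						if(ch=='t'):
-- 							score1+=5
-- 						if(ch=='c'):
-- 							score1+=2
-- 						if(ch=='p'):
-- 							score1+=3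
-- 						if(ch=='d'):
-- 							score1+=3
-- 						else:
-- 							continue
-- 					if(team2==True):
-- 						if(ch=='t'):
-- 							score2+=5
-- 						if(ch=='c'):
-- 							score2+=2
-- 						if(ch=='p'):
-- 							score2+=3
-- 						if(ch=='d'):
-- 							score2+=3
-- 						else:
-- 							continue
--     return (str(score1)+":"+str(score2)+"\n")
-- ===== SOURCE B (Python) =====
-- def rugby_solver(st):
--     points = {'t': 5, 'c': 2, 'p': 3, 'd': 3}
--     current = None
--     team1_plays = []
--     team2_plays = []
--     for ch in st:
--         if ch == '1':
--             current = 1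
--         elif ch == '2':
--             current = 2
--         elif current == 1:
--             team1_plays.append(ch)
--         elif current == 2:
--             team2_plays.append(ch)
--     score1 = sum(points.get(c, 0) for c in team1_plays)
--     score2 = sum(points.get(c, 0) for c in team2_plays)
--     return f"{score1}:{score2}\n"
-- ===== Notes on version B (the rewrite author's own statement) =====
-- stated objective: simpler
-- what changed: B first partitions the play characters into per-team lists keyed by a current-team marker, then scores each list with a single points dict, replacing A's inline dual-boolean state machine with its tangled if/continue chains.
import Mathlib
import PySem

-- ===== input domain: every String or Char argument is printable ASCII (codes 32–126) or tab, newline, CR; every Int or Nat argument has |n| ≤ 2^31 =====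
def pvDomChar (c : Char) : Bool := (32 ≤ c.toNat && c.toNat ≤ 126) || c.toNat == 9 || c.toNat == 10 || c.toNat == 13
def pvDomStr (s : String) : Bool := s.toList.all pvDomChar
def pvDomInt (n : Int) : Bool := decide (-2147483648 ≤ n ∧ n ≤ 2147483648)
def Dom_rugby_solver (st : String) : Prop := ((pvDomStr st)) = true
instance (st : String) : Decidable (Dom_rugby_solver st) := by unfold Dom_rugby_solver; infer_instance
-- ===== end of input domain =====

-- B partitions plays into per-team lists first and scores them with a points dict afterwards,
-- replacing A's inline dual-boolean state machine; same cost, simpler shape.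


-- ===== PORT A =====
-- one loop-body step of A: state (team1, team2, score1, score2), transliterated branch by branch
-- (A's 'else: continue' after the 'd' test skips the team2 block when team1 is set and ch ≠ 'd')
def rugbyStepA (s : Bool × Bool × Int × Int) (ch : Char) : Bool × Bool × Int × Int :=
  let (team1, team2, score1, score2) := s
  if ch = '1' then (true, false, score1, score2)
  else if ch = '2' then (false, true, score1, score2)
  else
    if team1 = true then
      let score1 := if ch = 't' then score1 + 5 else score1
      let score1 := if ch = 'c' then score1 + 2 else score1
      let score1 := if ch = 'p' then score1 + 3 else score1
      if ch = 'd' then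
        let score1 := score1 + 3
        -- falls through to the team2 block
        if team2 = true then
          let score2 := if ch = 't' then score2 + 5 else score2
          let score2 := if ch = 'c' then score2 + 2 else score2
          let score2 := if ch = 'p' then score2 + 3 else score2
          if ch = 'd' then (team1, team2, score1, score2 + 3)
          else (team1, team2, score1, score2)
        else (team1, team2, score1, score2)
      else (team1, team2, score1, score2)   -- 'else: continue'
    else
      if team2 = true then
        let score2 := if ch = 't' then score2 + 5 else score2
        let score2 := if ch = 'c' then score2 + 2 else score2
        let score2 := if ch = 'p' then score2 + 3 else score2
        if ch = 'd' then (team1, team2, score1, score2 + 3)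
        else (team1, team2, score1, score2)
      else (team1, team2, score1, score2)

def rugby_solver (st : String) : String :=
  PySem.Int.toStr (st.toList.foldl rugbyStepA (false, false, 0, 0)).2.2.1 ++ ":" ++
    PySem.Int.toStr (st.toList.foldl rugbyStepA (false, false, 0, 0)).2.2.2 ++ "\n"

-- ===== PORT B =====
def rugbyPoints : PySem.Dict Char Int :=
  ((((PySem.Dict.empty).insert 't' 5).insert 'c' 2).insert 'p' 3).insert 'd' 3

-- partition pass: state (current, team1_plays, team2_plays)
def rugbyStepB (s : Option Int × List Char × List Char) (ch : Char) :
    Option Int × List Char × List Char :=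
  let (current, p1, p2) := s
  if ch = '1' then (some 1, p1, p2)
  else if ch = '2' then (some 2, p1, p2)
  else if current = some 1 then (current, p1 ++ [ch], p2)
  else if current = some 2 then (current, p1, p2 ++ [ch])
  else (current, p1, p2)

def rugbyScore (plays : List Char) : Int :=
  plays.foldl (fun acc c => acc + rugbyPoints.getD c 0) 0

def rugby_solver_alt (st : String) : String :=
  PySem.Int.toStr (rugbyScore (st.toList.foldl rugbyStepB (none, [], [])).2.1) ++ ":" ++
    PySem.Int.toStr (rugbyScore (st.toList.foldl rugbyStepB (none, [], [])).2.2) ++ "\n"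

-- ===== PRECONDITION & SPEC =====
def Spec_rugby_solver (st : String) (out : String) : Prop := out = rugby_solver_alt st
instance (st : String) (out : String) : Decidable (Spec_rugby_solver st out) := by unfold Spec_rugby_solver; infer_instance

-- ===== CLAIM (what is proved, stated in full; the proofs are below) =====
def Claim_equal_rugby_solver : Prop := ∀ (st : String), Dom_rugby_solver st → Spec_rugby_solver st (rugby_solver st)

-- ===== LEMMAS AND PROOFS =====

-- points awarded by a non-marker character (proof-side characterisation of both scorings)
def pts (c : Char) : Int :=
  if c = 't' then 5 else if c = 'c' then 2 else if c = 'p' then 3 else if c = 'd' then 3 else 0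

theorem rugbyPoints_getD (c : Char) : rugbyPoints.getD c 0 = pts c := by
  by_cases h1 : c = 't'
  · subst h1; rfl
  by_cases h2 : c = 'c'
  · subst h2; rfl
  by_cases h3 : c = 'p'
  · subst h3; rfl
  by_cases h4 : c = 'd'
  · subst h4; rfl
  have e1 : ('t' == c) = false := by simpa [beq_iff_eq] using fun h => h1 h.symm
  have e2 : ('c' == c) = false := by simpa [beq_iff_eq] using fun h => h2 h.symm
  have e3 : ('p' == c) = false := by simpa [beq_iff_eq] using fun h => h3 h.symm
  have e4 : ('d' == c) = false := by simpa [beq_iff_eq] using fun h => h4 h.symm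
  simp [rugbyPoints, pts, PySem.Dict.getD, PySem.Dict.insert, PySem.Dict.empty, PySem.Dict.get?,
    List.find?, h1, h2, h3, h4, e1, e2, e3, e4]

theorem rugbyScore_append (l : List Char) (c : Char) :
    rugbyScore (l ++ [c]) = rugbyScore l + pts c := by
  simp only [rugbyScore, List.foldl_append, List.foldl_cons, List.foldl_nil]
  rw [rugbyPoints_getD]

-- the state correspondence: A's (team1, team2) ↔ B's current
def encode (t1 t2 : Bool) : Option Int :=
  if t1 then some 1 else if t2 then some 2 else none

-- main invariant: running A's loop from a valid state equals B's partition pass followed by scoring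
theorem loop_inv (l : List Char) :
    ∀ (t1 t2 : Bool) (s1 s2 : Int) (p1 p2 : List Char),
      ¬ (t1 = true ∧ t2 = true) →
      s1 = rugbyScore p1 → s2 = rugbyScore p2 →
      (l.foldl rugbyStepA (t1, t2, s1, s2)).2.2.1
          = rugbyScore (l.foldl rugbyStepB (encode t1 t2, p1, p2)).2.1 ∧
        (l.foldl rugbyStepA (t1, t2, s1, s2)).2.2.2
          = rugbyScore (l.foldl rugbyStepB (encode t1 t2, p1, p2)).2.2 := by
  induction l with
  | nil => intro t1 t2 s1 s2 p1 p2 _ h1 h2; exact ⟨h1, h2⟩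
  | cons c cs ih =>
    intro t1 t2 s1 s2 p1 p2 hval h1 h2
    simp only [List.foldl_cons]
    by_cases hc1 : c = '1'
    · subst hc1
      have := ih true false s1 s2 p1 p2 (by simp) h1 h2
      simpa [rugbyStepA, rugbyStepB, encode] using this
    · by_cases hc2 : c = '2'
      · subst hc2
        have := ih false true s1 s2 p1 p2 (by simp) h1 h2
        simpa [rugbyStepA, rugbyStepB, encode, hc1] using this
      · -- non-marker character: case on the (valid) team state
        cases t1 with
        | true =>
          have ht2 : t2 = false := by
            cases t2 with
            | true => exact absurd ⟨rfl, rfl⟩ hval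
            | false => rfl
          subst ht2
          have hstepA : rugbyStepA (true, false, s1, s2) c = (true, false, s1 + pts c, s2) := by
            by_cases h1' : c = 't' <;> by_cases h2' : c = 'c' <;> by_cases h3' : c = 'p' <;>
              by_cases h4' : c = 'd' <;>
              simp [rugbyStepA, pts, hc1, hc2, h1', h2', h3', h4']
          have hstepB : rugbyStepB (encode true false, p1, p2) c
              = (encode true false, p1 ++ [c], p2) := by
            simp [rugbyStepB, encode, hc1, hc2]
          rw [hstepA, hstepB]
          exact ih true false (s1 + pts c) s2 (p1 ++ [c]) p2 (by simp)
            (by rw [rugbyScore_append, h1]) h2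
        | false =>
          cases t2 with
          | true =>
            have hstepA : rugbyStepA (false, true, s1, s2) c = (false, true, s1, s2 + pts c) := by
              simp only [rugbyStepA, pts]
              by_cases h1' : c = 't' <;> by_cases h2' : c = 'c' <;> by_cases h3' : c = 'p' <;>
                by_cases h4' : c = 'd' <;> simp_all
            have hstepB : rugbyStepB (encode false true, p1, p2) c
                = (encode false true, p1, p2 ++ [c]) := by
              simp [rugbyStepB, encode, hc1, hc2]
            rw [hstepA, hstepB]
            exact ih false true s1 (s2 + pts c) p1 (p2 ++ [c]) (by simp) h1
              (by rw [rugbyScore_append, h2])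
          | false =>
            have hstepA : rugbyStepA (false, false, s1, s2) c = (false, false, s1, s2) := by
              simp [rugbyStepA, hc1, hc2]
            have hstepB : rugbyStepB (encode false false, p1, p2) c
                = (encode false false, p1, p2) := by
              simp [rugbyStepB, encode, hc1, hc2]
            rw [hstepA, hstepB]
            exact ih false false s1 s2 p1 p2 (by simp) h1 h2

-- ===== VERDICT (by name: the statement is the Claim_ definition above) =====
theorem rugby_solver_spec : Claim_equal_rugby_solver := by
  intro st _
  unfold Spec_rugby_solver rugby_solver rugby_solver_alt
  have h := loop_inv st.toList false false 0 0 [] [] (by simp) (by simp [rugbyScore])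
    (by simp [rugbyScore])
  simp only [encode, Bool.false_eq_true, if_false] at h
  rw [h.1, h.2]
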